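-- pv_equiv track=rewrite | github.com/berkaygediz/SolidWriting | SolidWriting.py | tableTemplates
-- ===== SOURCE A (Python) =====
-- def tableTemplates(template_id, rows, cols, alignment="center"):
--     table_style = "border: 1px solid #ddd; border-collapse: collapse; width: 100%;"
--     td_style = "padding: 8px; border: 1px solid #ddd; color: black;"
--     th_style = "padding: 10px; border: 1px solid #ddd; color: black; width: 1%;"
--     tr_styles = "background-color: #ffffff;"
--
--     templates = {
--         "simple_border": {
--             "table_style": table_style,
--             "td_style": td_style,
--             "th_style": th_style,
--             "tr_styles": "background-color: #ffffff;",
--         },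
--         "dual_header_color": {
--             "table_style": table_style,
--             "td_style": "padding: 8px; border: 1px solid #ffcc00; color: black;",
--             "th_style": "padding: 10px; border: 1px solid #ffcc00; color: black; background-color: #ffcc00;",
--             "tr_styles": "background-color: #fff3e0;",
--         },
--         "minimalist_lines": {
--             "table_style": table_style,
--             "td_style": td_style,
--             "th_style": "padding: 10px; border: 1px solid #ddd; background-color: #f2f2f2; color: black;",
--             "tr_styles": "background-color: #f9f9f9;",
--         },
--         "colored_rows": {
--             "table_style": table_style,
--             "td_style": "padding: 8px; border: 1px solid #ffcc00; color: black;",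
--             "th_style": "padding: 10px; border: 1px solid #ffcc00; color: black; background-color: #ffcc00;",
--             "tr_styles": "background-color: #fff3e0;",
--         },
--     }
--
--     selected_template = templates.get(template_id, templates["simple_border"])
--     table_style = selected_template["table_style"]
--     td_style = selected_template["td_style"]
--     th_style = selected_template["th_style"]
--     tr_styles = selected_template["tr_styles"]
--
--     table_html = f"""
--         <div style="text-align: {alignment};">
--             <table style="{table_style}">
--                 <tr>
--     """
--
--     for i in range(cols):
--         table_html += f'<th style="{th_style}"></th>'
--
--     table_html += "</tr>"
--
--     for i in range(rows):
--         table_html += f'<tr style="{tr_styles}">'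
--         for j in range(cols):
--             table_html += f'<td style="{td_style}"></td>'
--         table_html += "</tr>"
--
--     table_html += """
--             </table>
--         </div>
--     """
--
--     return table_html
-- ===== SOURCE B (Python) =====
-- def tableTemplates(template_id, rows, cols, alignment="center"):
--     table_style = "border: 1px solid #ddd; border-collapse: collapse; width: 100%;"
--     default = (
--         "padding: 8px; border: 1px solid #ddd; color: black;",
--         "padding: 10px; border: 1px solid #ddd; color: black; width: 1%;",
--         "background-color: #ffffff;",
--     )
--     styles = {
--         "dual_header_color": (
--             "padding: 8px; border: 1px solid #ffcc00; color: black;",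
--             "padding: 10px; border: 1px solid #ffcc00; color: black; background-color: #ffcc00;",
--             "background-color: #fff3e0;",
--         ),
--         "minimalist_lines": (
--             "padding: 8px; border: 1px solid #ddd; color: black;",
--             "padding: 10px; border: 1px solid #ddd; background-color: #f2f2f2; color: black;",
--             "background-color: #f9f9f9;",
--         ),
--         "colored_rows": (
--             "padding: 8px; border: 1px solid #ffcc00; color: black;",
--             "padding: 10px; border: 1px solid #ffcc00; color: black; background-color: #ffcc00;",
--             "background-color: #fff3e0;",
--         ),
--     }
--     td_style, th_style, tr_styles = styles.get(template_id, default)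
--
--     header_cells = f'<th style="{th_style}"></th>' * cols
--     body_row = f'<tr style="{tr_styles}">' + f'<td style="{td_style}"></td>' * cols + "</tr>"
--
--     return (
--         f'\n        <div style="text-align: {alignment};">\n'
--         f'            <table style="{table_style}">\n'
--         f'                <tr>\n    '
--         + header_cells
--         + "</tr>"
--         + body_row * rows
--         + "\n            </table>\n        </div>\n    "
--     )
-- ===== Notes on version B (the rewrite author's own statement) =====
-- stated objective: simpler
-- what changed: Replaces A's two nested per-cell appending loops (and the header loop) with string repetition: one header cell and one full body row are built once and multiplied by cols/rows; the style table maps template ids directly to (td, th, tr) triples instead of nested dicts re-read field by field.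
import Mathlib
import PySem

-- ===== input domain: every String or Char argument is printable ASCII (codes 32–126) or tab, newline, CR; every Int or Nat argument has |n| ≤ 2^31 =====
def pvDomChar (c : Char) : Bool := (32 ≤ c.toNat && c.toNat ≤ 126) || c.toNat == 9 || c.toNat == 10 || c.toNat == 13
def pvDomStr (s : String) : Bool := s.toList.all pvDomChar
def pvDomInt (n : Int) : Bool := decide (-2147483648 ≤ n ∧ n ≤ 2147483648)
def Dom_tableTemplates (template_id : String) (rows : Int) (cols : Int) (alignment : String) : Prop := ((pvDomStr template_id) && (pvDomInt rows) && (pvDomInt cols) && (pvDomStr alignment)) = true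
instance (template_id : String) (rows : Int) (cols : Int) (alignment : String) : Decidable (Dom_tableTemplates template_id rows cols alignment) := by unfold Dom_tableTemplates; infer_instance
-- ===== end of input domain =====

-- B replaces A's two nested cell-appending loops by string repetition (cell * cols, row * rows); objective: simpler, same O(rows*cols) cost.

-- ===== PORT A =====
-- literal transliteration of A; strings are handled as List Char (String.mk at the end is exact)
def tableTemplates (template_id : String) (rows : Int) (cols : Int) (alignment : String) : String :=
  let table_style := "border: 1px solid #ddd; border-collapse: collapse; width: 100%;"
  let td_style := "padding: 8px; border: 1px solid #ddd; color: black;"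
  let th_style := "padding: 10px; border: 1px solid #ddd; color: black; width: 1%;"
  let templates : PySem.Dict String (PySem.Dict String String) := PySem.Dict.ofList [
    ("simple_border", PySem.Dict.ofList [
      ("table_style", table_style), ("td_style", td_style), ("th_style", th_style),
      ("tr_styles", "background-color: #ffffff;")]),
    ("dual_header_color", PySem.Dict.ofList [
      ("table_style", table_style),
      ("td_style", "padding: 8px; border: 1px solid #ffcc00; color: black;"),
      ("th_style", "padding: 10px; border: 1px solid #ffcc00; color: black; background-color: #ffcc00;"),
      ("tr_styles", "background-color: #fff3e0;")]),
    ("minimalist_lines", PySem.Dict.ofList [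
      ("table_style", table_style), ("td_style", td_style),
      ("th_style", "padding: 10px; border: 1px solid #ddd; background-color: #f2f2f2; color: black;"),
      ("tr_styles", "background-color: #f9f9f9;")]),
    ("colored_rows", PySem.Dict.ofList [
      ("table_style", table_style),
      ("td_style", "padding: 8px; border: 1px solid #ffcc00; color: black;"),
      ("th_style", "padding: 10px; border: 1px solid #ffcc00; color: black; background-color: #ffcc00;"),
      ("tr_styles", "background-color: #fff3e0;")])]
  -- templates.get(template_id, templates["simple_border"]); the keys below are always present,
  -- so Python's d[k] (KeyError impossible) is ported as get? with a dummy default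
  let selected := templates.getD template_id ((templates.get? "simple_border").getD PySem.Dict.empty)
  let table_style := (selected.get? "table_style").getD ""
  let td_style := (selected.get? "td_style").getD ""
  let th_style := (selected.get? "th_style").getD ""
  let tr_styles := (selected.get? "tr_styles").getD ""
  let table_html := "\n        <div style=\"text-align: ".toList ++ alignment.toList ++ ";\">\n            <table style=\"".toList ++ table_style.toList ++ "\">\n                <tr>\n    ".toList
  let table_html := (PySem.List.pyRange 0 cols 1).foldl
    (fun acc _ => acc ++ ("<th style=\"".toList ++ th_style.toList ++ "\"></th>".toList)) table_html
  let table_html := table_html ++ "</tr>".toList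
  let table_html := (PySem.List.pyRange 0 rows 1).foldl
    (fun acc _ =>
      ((PySem.List.pyRange 0 cols 1).foldl
        (fun acc2 _ => acc2 ++ ("<td style=\"".toList ++ td_style.toList ++ "\"></td>".toList))
        (acc ++ ("<tr style=\"".toList ++ tr_styles.toList ++ "\">".toList)))
      ++ "</tr>".toList) table_html
  String.mk (table_html ++ "\n            </table>\n        </div>\n    ".toList)

-- ===== PORT B =====
-- literal transliteration of Source B; Python's 's * n' is PySem.List.pyRepeat on the char list
def tableTemplates_alt (template_id : String) (rows : Int) (cols : Int) (alignment : String) : String :=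
  let table_style := "border: 1px solid #ddd; border-collapse: collapse; width: 100%;"
  let dflt : String × String × String :=
    ("padding: 8px; border: 1px solid #ddd; color: black;",
     "padding: 10px; border: 1px solid #ddd; color: black; width: 1%;",
     "background-color: #ffffff;")
  let styles : PySem.Dict String (String × String × String) := PySem.Dict.ofList [
    ("dual_header_color",
      ("padding: 8px; border: 1px solid #ffcc00; color: black;",
       "padding: 10px; border: 1px solid #ffcc00; color: black; background-color: #ffcc00;",
       "background-color: #fff3e0;")),
    ("minimalist_lines",
      ("padding: 8px; border: 1px solid #ddd; color: black;",
       "padding: 10px; border: 1px solid #ddd; background-color: #f2f2f2; color: black;",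
       "background-color: #f9f9f9;")),
    ("colored_rows",
      ("padding: 8px; border: 1px solid #ffcc00; color: black;",
       "padding: 10px; border: 1px solid #ffcc00; color: black; background-color: #ffcc00;",
       "background-color: #fff3e0;"))]
  let sel := styles.getD template_id dflt
  let td_style := sel.1
  let th_style := sel.2.1
  let tr_styles := sel.2.2
  let header_cells := PySem.List.pyRepeat ("<th style=\"".toList ++ th_style.toList ++ "\"></th>".toList) cols
  let body_row := ("<tr style=\"".toList ++ tr_styles.toList ++ "\">".toList)
    ++ PySem.List.pyRepeat ("<td style=\"".toList ++ td_style.toList ++ "\"></td>".toList) cols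
    ++ "</tr>".toList
  String.mk ("\n        <div style=\"text-align: ".toList ++ alignment.toList
    ++ ";\">\n            <table style=\"".toList ++ table_style.toList
    ++ "\">\n                <tr>\n    ".toList
    ++ header_cells ++ "</tr>".toList
    ++ PySem.List.pyRepeat body_row rows
    ++ "\n            </table>\n        </div>\n    ".toList)

-- ===== PRECONDITION & SPEC =====
def Spec_tableTemplates (template_id : String) (rows : Int) (cols : Int) (alignment : String) (out : String) : Prop := out = tableTemplates_alt template_id rows cols alignment
instance (template_id : String) (rows : Int) (cols : Int) (alignment : String) (out : String) : Decidable (Spec_tableTemplates template_id rows cols alignment out) := by unfold Spec_tableTemplates; infer_instance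

-- ===== CLAIM (what is proved, stated in full; the proofs are below) =====
def Claim_equal_tableTemplates : Prop := ∀ (template_id : String) (rows : Int) (cols : Int) (alignment : String), Dom_tableTemplates template_id rows cols alignment → Spec_tableTemplates template_id rows cols alignment (tableTemplates template_id rows cols alignment)

-- ===== LEMMAS AND PROOFS =====

-- appending a constant chunk once per loop iteration is repetition
theorem foldl_const_append {α : Type} (l : List α) (acc s : List Char) :
    l.foldl (fun a _ => a ++ s) acc = acc ++ (List.replicate l.length s).flatten := by
  induction l generalizing acc with
  | nil => simp
  | cons x t ih => simp [List.foldl_cons, ih, List.replicate_succ]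

-- A's header loop + row loop (with the inner cell loop) equal B's repeated chunks
theorem loops_eq (rows cols : Int) (thc tro tdc init : List Char) :
    (PySem.List.pyRange 0 rows 1).foldl
      (fun acc _ =>
        ((PySem.List.pyRange 0 cols 1).foldl (fun acc2 _ => acc2 ++ tdc) (acc ++ tro))
        ++ "</tr>".toList)
      (((PySem.List.pyRange 0 cols 1).foldl (fun a _ => a ++ thc) init) ++ "</tr>".toList)
    = init ++ (PySem.List.pyRepeat thc cols ++ ("</tr>".toList
        ++ PySem.List.pyRepeat (tro ++ (PySem.List.pyRepeat tdc cols ++ "</tr>".toList)) rows)) := by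
  rw [PySem.List.foldl_congr_mem _ _
        (fun acc _ => acc ++ (tro ++ (PySem.List.pyRepeat tdc cols ++ "</tr>".toList))) _
        (by
          intro acc x _
          rw [foldl_const_append]
          simp [PySem.List.pyRepeat, PySem.List.length_pyRange_one])]
  rw [foldl_const_append, foldl_const_append]
  simp [PySem.List.pyRepeat, PySem.List.length_pyRange_one]

theorem tableTemplates_eq (template_id : String) (rows cols : Int) (alignment : String) :
    tableTemplates template_id rows cols alignment
    = tableTemplates_alt template_id rows cols alignment := by
  by_cases h1 : template_id = "simple_border"
  · subst h1; simp only [tableTemplates, tableTemplates_alt]; rw [loops_eq]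
    simp only [List.append_assoc]; rfl
  by_cases h2 : template_id = "dual_header_color"
  · subst h2; simp only [tableTemplates, tableTemplates_alt]; rw [loops_eq]
    simp only [List.append_assoc]; rfl
  by_cases h3 : template_id = "minimalist_lines"
  · subst h3; simp only [tableTemplates, tableTemplates_alt]; rw [loops_eq]
    simp only [List.append_assoc]; rfl
  by_cases h4 : template_id = "colored_rows"
  · subst h4; simp only [tableTemplates, tableTemplates_alt]; rw [loops_eq]
    simp only [List.append_assoc]; rfl
  · simp only [tableTemplates, tableTemplates_alt]
    rw [loops_eq]
    rw [PySem.Dict.getD_of_not_contains _ _ (by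
      rw [Bool.eq_false_iff]
      intro hc
      have := (PySem.Dict.contains_iff_mem_keys _ template_id).mp hc
      rw [show (PySem.Dict.ofList [("simple_border", (PySem.Dict.ofList [("table_style", "border: 1px solid #ddd; border-collapse: collapse; width: 100%;"), ("td_style", "padding: 8px; border: 1px solid #ddd; color: black;"), ("th_style", "padding: 10px; border: 1px solid #ddd; color: black; width: 1%;"), ("tr_styles", "background-color: #ffffff;")] : PySem.Dict String String)), ("dual_header_color", PySem.Dict.ofList [("table_style", "border: 1px solid #ddd; border-collapse: collapse; width: 100%;"), ("td_style", "padding: 8px; border: 1px solid #ffcc00; color: black;"), ("th_style", "padding: 10px; border: 1px solid #ffcc00; color: black; background-color: #ffcc00;"), ("tr_styles", "background-color: #fff3e0;")]), ("minimalist_lines", PySem.Dict.ofList [("table_style", "border: 1px solid #ddd; border-collapse: collapse; width: 100%;"), ("td_style", "padding: 8px; border: 1px solid #ddd; color: black;"), ("th_style", "padding: 10px; border: 1px solid #ddd; background-color: #f2f2f2; color: black;"), ("tr_styles", "background-color: #f9f9f9;")]), ("colored_rows", PySem.Dict.ofList [("table_style", "border: 1px solid #ddd; border-collapse: collapse; width: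 100%;"), ("td_style", "padding: 8px; border: 1px solid #ffcc00; color: black;"), ("th_style", "padding: 10px; border: 1px solid #ffcc00; color: black; background-color: #ffcc00;"), ("tr_styles", "background-color: #fff3e0;")])]).keys = ["simple_border", "dual_header_color", "minimalist_lines", "colored_rows"] from rfl] at this
      simp only [List.mem_cons, List.not_mem_nil, or_false] at this
      rcases this with h | h | h | h
      exacts [h1 h, h2 h, h3 h, h4 h])]
    rw [PySem.Dict.getD_of_not_contains _ _ (by
      rw [Bool.eq_false_iff]
      intro hc
      have := (PySem.Dict.contains_iff_mem_keys _ template_id).mp hc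
      rw [show (PySem.Dict.ofList [("dual_header_color", ("padding: 8px; border: 1px solid #ffcc00; color: black;", "padding: 10px; border: 1px solid #ffcc00; color: black; background-color: #ffcc00;", "background-color: #fff3e0;")), ("minimalist_lines", ("padding: 8px; border: 1px solid #ddd; color: black;", "padding: 10px; border: 1px solid #ddd; background-color: #f2f2f2; color: black;", "background-color: #f9f9f9;")), ("colored_rows", ("padding: 8px; border: 1px solid #ffcc00; color: black;", "padding: 10px; border: 1px solid #ffcc00; color: black; background-color: #ffcc00;", "background-color: #fff3e0;"))] : PySem.Dict String (String × String × String)).keys = ["dual_header_color", "minimalist_lines", "colored_rows"] from rfl] at this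
      simp only [List.mem_cons, List.not_mem_nil, or_false] at this
      rcases this with h | h | h
      exacts [h2 h, h3 h, h4 h])]
    simp only [List.append_assoc]; rfl

-- ===== VERDICT (by name: the statement is the Claim_ definition above) =====
theorem tableTemplates_spec : Claim_equal_tableTemplates := by
  intro template_id rows cols alignment _
  unfold Spec_tableTemplates
  exact tableTemplates_eq template_id rows cols alignment
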